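-- pv_equiv track=rewrite | github.com/rameezk/advent-of-code | py/aoc/2024/2024_d09_p2.py | find_leftmost_free_space_position
-- ===== SOURCE A (Python) =====
-- def find_leftmost_free_space_position(disk: list, needed_size: int) -> int:
--     count, start = 0, 0
--
--     for i, val in enumerate(disk):
--         if val == ".":
--             if count == 0:
--                 start = i
--             count += 1
--             if count >= needed_size:
--                 return start
--         else:
--             count = 0
--
--     return -1
-- ===== SOURCE B (Python) =====
-- def find_leftmost_free_space_position(disk: list, needed_size: int) -> int:
--     k = max(needed_size, 1)
--     i = 0
--     while i + k <= len(disk):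
--         if all(disk[i + j] == "." for j in range(k)):
--             return i
--         i += 1
--     return -1
-- ===== Notes on version B (the rewrite author's own statement) =====
-- stated objective: alternative
-- what changed: Replaced A's single-pass run-counter state machine by a candidate-start search: for each index i it directly tests whether the whole window disk[i:i+k] (k = max(needed_size,1)) consists of '.', returning the first such i.
import Mathlib
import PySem

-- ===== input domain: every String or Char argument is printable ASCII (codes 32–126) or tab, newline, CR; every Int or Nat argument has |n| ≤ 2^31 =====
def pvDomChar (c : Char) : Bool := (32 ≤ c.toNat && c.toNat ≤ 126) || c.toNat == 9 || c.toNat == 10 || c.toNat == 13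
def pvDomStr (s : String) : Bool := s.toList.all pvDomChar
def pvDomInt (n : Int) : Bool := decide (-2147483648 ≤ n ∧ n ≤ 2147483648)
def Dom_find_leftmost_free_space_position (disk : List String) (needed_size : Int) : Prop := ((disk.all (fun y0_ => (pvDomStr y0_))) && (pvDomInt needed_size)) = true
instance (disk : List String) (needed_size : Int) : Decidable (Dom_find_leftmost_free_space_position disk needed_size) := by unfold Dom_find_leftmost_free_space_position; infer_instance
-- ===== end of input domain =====

-- B replaces A's run-counter state machine by a candidate-start search that tests each
-- window disk[i:i+k] directly (alternative decomposition, not faster); proved equal on all inputs.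

-- ===== PORT A =====
-- A's loop: state (i, count, start); the early return is modelled by returning directly
def goA (needed : Int) : List String → Int → Int → Int → Int
  | [], _, _, _ => -1
  | v :: rest, i, count, start =>
    if v = "." then
      let start' := if count = 0 then i else start
      let count' := count + 1
      if needed ≤ count' then start'
      else goA needed rest (i + 1) count' start'
    else goA needed rest (i + 1) 0 start

def find_leftmost_free_space_position (disk : List String) (needed_size : Int) : Int :=
  goA needed_size disk 0 0 0

-- ===== PORT B =====
-- all(disk[i + j] == "." for j in range(k)); indices are in range when i + k ≤ len disk,
-- so getD with default "" is exact there (and "" ≠ "." makes out-of-range windows fail)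
def winAll (disk : List String) (i k : Nat) : Bool :=
  (List.range k).all (fun j => disk.getD (i + j) "" == ".")

-- the while loop: i increases until i + k > len(disk)
def goB (disk : List String) (k : Nat) (i : Nat) : Int :=
  if (i : Int) + (k : Int) ≤ (disk.length : Int) then
    if winAll disk i k then (i : Int) else goB disk k (i + 1)
  else -1
termination_by disk.length + 1 - i
decreasing_by omega

def find_leftmost_free_space_position_alt (disk : List String) (needed_size : Int) : Int :=
  goB disk (max needed_size 1).toNat 0

-- ===== PRECONDITION & SPEC =====
def Spec_find_leftmost_free_space_position (disk : List String) (needed_size : Int) (out : Int) : Prop := out = find_leftmost_free_space_position_alt disk needed_size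
instance (disk : List String) (needed_size : Int) (out : Int) : Decidable (Spec_find_leftmost_free_space_position disk needed_size out) := by unfold Spec_find_leftmost_free_space_position; infer_instance

-- ===== CLAIM (what is proved, stated in full; the proofs are below) =====
def Claim_equal_find_leftmost_free_space_position : Prop := ∀ (disk : List String) (needed_size : Int), Dom_find_leftmost_free_space_position disk needed_size → Spec_find_leftmost_free_space_position disk needed_size (find_leftmost_free_space_position disk needed_size)

-- ===== LEMMAS AND PROOFS =====

-- with count = 0 the carried start is never read before being overwritten
theorem goA_start_indep (needed : Int) :
    ∀ (l : List String) (p st st' : Int), goA needed l p 0 st = goA needed l p 0 st' := by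
  intro l
  induction l with
  | nil => intro p st st'; rfl
  | cons v rest ih =>
    intro p st st'
    by_cases hv : v = "."
    · simp [goA, hv]
    · simp [goA, hv]; exact ih (p + 1) st st'

-- a window reaching past the end of the disk fails (default "" ≠ ".")
theorem winAll_oob (disk : List String) (k j : Nat) (hk : 1 ≤ k)
    (h : disk.length < j + k) : winAll disk j k = false := by
  apply List.all_eq_false.mpr
  refine ⟨k - 1, List.mem_range.mpr (by omega), ?_⟩
  have hd : disk.getD (j + (k - 1)) "" = "" := List.getD_eq_default _ _ (by omega)
  simp only [beq_iff_eq, hd]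
  decide

theorem goB_stop (disk : List String) (k : Nat) :
    ∀ (fuel i₀ : Nat), disk.length + 1 - i₀ ≤ fuel →
      (∀ j, i₀ ≤ j → winAll disk j k = false) → goB disk k i₀ = -1 := by
  intro fuel
  induction fuel with
  | zero =>
    intro i₀ hf _
    rw [goB, if_neg (by omega)]
  | succ m ih =>
    intro i₀ hf h
    rw [goB]
    split_ifs with h1 h2
    · exact absurd h2 (by simp [h i₀ le_rfl])
    · exact ih (i₀ + 1) (by omega) (fun j hj => h j (by omega))
    · rfl

theorem goB_skip (disk : List String) (k : Nat) :
    ∀ (fuel i₀ m : Nat), m - i₀ ≤ fuel → i₀ ≤ m →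
      (∀ j, i₀ ≤ j → j < m → winAll disk j k = false) →
      goB disk k i₀ = goB disk k m := by
  intro fuel
  induction fuel with
  | zero =>
    intro i₀ m hf hle _
    have : i₀ = m := by omega
    rw [this]
  | succ f ih =>
    intro i₀ m hf hle h
    rcases Nat.eq_or_lt_of_le hle with heq | hlt
    · rw [heq]
    · rw [goB]
      split_ifs with h1 h2
      · exact absurd h2 (by simp [h i₀ le_rfl hlt])
      · exact ih (i₀ + 1) m (by omega) (by omega) (fun j hj1 hj2 => h j (by omega) hj2)
      · rw [goB, if_neg (by omega)]

theorem goB_hit (disk : List String) (k m : Nat)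
    (h1 : (m : Int) + (k : Int) ≤ (disk.length : Int)) (h2 : winAll disk m k = true) :
    goB disk k m = (m : Int) := by
  rw [goB, if_pos h1, if_pos h2]

-- drop i = v :: rest gives disk[i] = v, i < length, drop (i+1) = rest
theorem drop_cons_facts (disk : List String) (i : Nat) (v : String) (rest : List String)
    (h : disk.drop i = v :: rest) :
    disk.getD i "" = v ∧ i < disk.length ∧ disk.drop (i + 1) = rest := by
  have hi : i < disk.length := by
    by_contra hc
    rw [List.drop_eq_nil_of_le (by omega)] at h
    simp at h
  have h0 : (disk.drop i)[0]? = some v := by rw [h]; rfl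
  rw [List.getElem?_drop] at h0
  have hget : disk[i]? = some v := by simpa using h0
  refine ⟨by simp [List.getD, hget], hi, ?_⟩
  have := congrArg (List.drop 1) h
  rwa [List.drop_drop, List.drop_one, List.tail_cons] at this

-- one-step unfolding of goA on a "." cell (definitional)
theorem goA_cons_dot (needed : Int) (rest : List String) (i count start : Int) :
    goA needed ("." :: rest) i count start =
      if needed ≤ count + 1 then (if count = 0 then i else start)
      else goA needed rest (i + 1) (count + 1) (if count = 0 then i else start) := by
  simp only [goA]
  split <;> split <;> simp_all

-- main invariant: after processing disk[:i] with trailing dot-run of length c (c < k),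
-- no window of k dots starts before i - c, and A's carried start equals i - c
theorem goA_eq (disk : List String) (needed : Int) (k : Nat)
    (hk : k = (max needed 1).toNat) :
    ∀ (l : List String) (i c : Nat),
      disk.drop i = l → c ≤ i → c < k →
      (∀ t, t < c → disk.getD (i - c + t) "" = ".") →
      (∀ j, j < i - c → winAll disk j k = false) →
      goA needed l (i : Int) (c : Int) ((i : Int) - (c : Int)) = goB disk k 0 := by
  have hk1 : 1 ≤ k := by omega
  intro l
  induction l with
  | nil =>
    intro i c hdrop hci hck _ hwin
    have hni : disk.length ≤ i := by
      by_contra hc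
      rw [List.drop_eq_nil_iff] at hdrop
      omega
    rw [show goA needed [] (i:Int) (c:Int) ((i:Int)-(c:Int)) = -1 from rfl]
    refine (goB_stop disk k (disk.length + 1) 0 (by omega) ?_).symm
    intro j _
    by_cases hj : j < i - c
    · exact hwin j hj
    · exact winAll_oob disk k j hk1 (by omega)
  | cons v rest ih =>
    intro i c hdrop hci hck hdots hwin
    obtain ⟨hv, hi, hrest⟩ := drop_cons_facts disk i v rest hdrop
    by_cases hvdot : v = "."
    · subst hvdot
      by_cases hret : needed ≤ (c : Int) + 1
      · -- A returns start = i - c; B finds the window at i - c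
        have hA : goA needed ("." :: rest) (i:Int) (c:Int) ((i:Int)-(c:Int)) = (i:Int) - (c:Int) := by
          rw [goA_cons_dot, if_pos hret]
          split <;> omega
        have hkc : k = c + 1 := by omega
        have hwinhit : winAll disk (i - c) k = true := by
          apply List.all_eq_true.mpr
          intro j hj
          have hj' : j < k := List.mem_range.mp hj
          simp only [beq_iff_eq]
          by_cases hjc : j < c
          · exact hdots j hjc
          · have h2 : i - c + j = i := by omega
            rw [h2]; exact hv
        have hB : goB disk k 0 = ((i - c : Nat) : Int) := by
          rw [goB_skip disk k (i - c) 0 (i - c) le_rfl (Nat.zero_le _)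
              (fun j _ hj2 => hwin j hj2)]
          exact goB_hit disk k (i - c) (by omega) hwinhit
        rw [hA, hB]; omega
      · -- A continues with count c+1, start i - c
        have hA : goA needed ("." :: rest) (i:Int) (c:Int) ((i:Int)-(c:Int)) =
            goA needed rest ((i:Int) + 1) ((c:Int) + 1) ((i:Int) - (c:Int)) := by
          rw [goA_cons_dot, if_neg hret]
          split
          · next h0 => congr 1; omega
          · rfl
        rw [hA]
        have := ih (i + 1) (c + 1) hrest (by omega) (by omega)
          (fun t ht => by
            by_cases htc : t < c
            · have h2 : i + 1 - (c + 1) + t = i - c + t := by omega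
              rw [h2]; exact hdots t htc
            · have h2 : i + 1 - (c + 1) + t = i := by omega
              rw [h2]; exact hv)
          (fun j hj => hwin j (by omega))
        have hcast1 : ((i + 1 : Nat) : Int) = (i:Int) + 1 := by push_cast; ring
        have hcast2 : ((c + 1 : Nat) : Int) = (c:Int) + 1 := by push_cast; ring
        rw [hcast1, hcast2] at this
        rw [show (i:Int) + 1 - ((c:Int) + 1) = (i:Int) - (c:Int) from by ring] at this
        exact this
    · -- non-dot cell: count resets, every window starting in [i-c, i] fails
      have hA : goA needed (v :: rest) (i:Int) (c:Int) ((i:Int)-(c:Int)) =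
          goA needed rest ((i:Int) + 1) 0 ((i:Int) + 1) := by
        simp only [goA, if_neg hvdot]
        exact goA_start_indep needed rest ((i:Int)+1) _ _
      rw [hA]
      have := ih (i + 1) 0 hrest (by omega) (by omega)
        (fun t ht => absurd ht (by omega))
        (fun j hj => by
          by_cases hjc : j < i - c
          · exact hwin j hjc
          · apply List.all_eq_false.mpr
            refine ⟨i - j, List.mem_range.mpr (by omega), ?_⟩
            have h2 : j + (i - j) = i := by omega
            simp only [beq_iff_eq, h2, hv]
            exact hvdot)
      have hcast1 : ((i + 1 : Nat) : Int) = (i:Int) + 1 := by push_cast; ring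
      rw [hcast1] at this
      simpa using this

-- ===== VERDICT (by name: the statement is the Claim_ definition above) =====
theorem find_leftmost_free_space_position_spec : Claim_equal_find_leftmost_free_space_position := by
  intro disk needed_size _
  unfold Spec_find_leftmost_free_space_position find_leftmost_free_space_position
    find_leftmost_free_space_position_alt
  exact goA_eq disk needed_size _ rfl disk 0 0 rfl le_rfl (by omega)
    (fun t ht => absurd ht (by omega)) (fun j hj => absurd hj (by omega))
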